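-- pv_equiv track=rewrite | github.com/BandaruDheeraj/sticky-note | templates/hooks/parse-transcript.py | extract_narrative_from_text
-- ===== SOURCE A (Python) =====
-- def extract_narrative_from_text(lines):
--     """Extract narrative from plain-text transcript."""
--     # Use the last substantial block of text as narrative
--     text_blocks = []
--     current_block = []
--
--     for line in lines:
--         stripped = line.strip()
--         if stripped:
--             current_block.append(stripped)
--         elif current_block:
--             text_blocks.append(" ".join(current_block))
--             current_block = []
--
--     if current_block:
--         text_blocks.append(" ".join(current_block))
--
--     if not text_blocks:
--         return ""
--
--     # Return the last substantial block
--     for block in reversed(text_blocks):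
--         if len(block) > 20:
--             return block[:300].strip()
--     return ""
-- ===== SOURCE B (Python) =====
-- def extract_narrative_from_text(lines):
--     """Extract narrative from plain-text transcript."""
--     # Scan from the end; the first substantial block found is the answer.
--     buffer = []
--     for line in reversed(lines):
--         stripped = line.strip()
--         if stripped:
--             buffer.append(stripped)
--         elif buffer:
--             block = " ".join(reversed(buffer))
--             if len(block) > 20:
--                 return block[:300].strip()
--             buffer = []
--     if buffer:
--         block = " ".join(reversed(buffer))
--         if len(block) > 20:
--             return block[:300].strip()
--     return ""
-- ===== Notes on version B (the rewrite author's own statement) =====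
-- stated objective: alternative
-- what changed: B scans the lines back-to-front with a single buffer and returns at the first substantial block it completes, instead of A's two phases of building the full block list and then scanning it in reverse.
import Mathlib
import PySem

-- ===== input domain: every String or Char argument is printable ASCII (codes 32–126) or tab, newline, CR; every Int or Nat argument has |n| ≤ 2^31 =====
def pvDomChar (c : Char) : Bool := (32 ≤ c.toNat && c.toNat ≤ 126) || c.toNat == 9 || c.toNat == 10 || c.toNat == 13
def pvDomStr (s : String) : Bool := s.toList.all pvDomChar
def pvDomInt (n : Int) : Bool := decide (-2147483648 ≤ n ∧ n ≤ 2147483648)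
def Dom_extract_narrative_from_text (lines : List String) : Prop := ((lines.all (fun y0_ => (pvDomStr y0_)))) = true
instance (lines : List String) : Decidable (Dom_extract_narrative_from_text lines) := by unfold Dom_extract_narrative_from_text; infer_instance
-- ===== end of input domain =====

-- B scans the lines back-to-front with one buffer and returns at the first (i.e. last) substantial
-- block, instead of building the full block list first; objective: alternative decomposition.

-- ===== PORT A =====
-- A's final loop: 'for block in reversed(text_blocks): if len(block) > 20: return block[:300].strip()'
def pvFindA : List String → String
  | [] => ""
  | b :: rest =>
      if 20 < PySem.Str.len b then PySem.Str.strip (PySem.Str.slice b none (some 300))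
      else pvFindA rest

def extract_narrative_from_text (lines : List String) : String :=
  let st := lines.foldl
    (fun (st : List String × List String) line =>
      let stripped := PySem.Str.strip line
      if stripped ≠ "" then (st.1, st.2 ++ [stripped])
      else if st.2 ≠ [] then (st.1 ++ [PySem.Str.join " " st.2], [])
      else st)
    ([], [])
  let text_blocks := if st.2 ≠ [] then st.1 ++ [PySem.Str.join " " st.2] else st.1
  if text_blocks = [] then "" else pvFindA text_blocks.reverse

-- ===== PORT B =====
-- B's loop over reversed(lines) with its buffer; the post-loop flush is the [] case.
def pvBLoop : List String → List String → String
  | [], buffer =>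
      if buffer ≠ [] then
        let block := PySem.Str.join " " buffer.reverse
        if 20 < PySem.Str.len block then PySem.Str.strip (PySem.Str.slice block none (some 300))
        else ""
      else ""
  | line :: rest, buffer =>
      let stripped := PySem.Str.strip line
      if stripped ≠ "" then pvBLoop rest (buffer ++ [stripped])
      else if buffer ≠ [] then
        let block := PySem.Str.join " " buffer.reverse
        if 20 < PySem.Str.len block then PySem.Str.strip (PySem.Str.slice block none (some 300))
        else pvBLoop rest []
      else pvBLoop rest buffer

def extract_narrative_from_text_alt (lines : List String) : String :=
  pvBLoop lines.reverse []

-- ===== PRECONDITION & SPEC =====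
def Spec_extract_narrative_from_text (lines : List String) (out : String) : Prop := out = extract_narrative_from_text_alt lines
instance (lines : List String) (out : String) : Decidable (Spec_extract_narrative_from_text lines out) := by unfold Spec_extract_narrative_from_text; infer_instance

-- ===== CLAIM (what is proved, stated in full; the proofs are below) =====
def Claim_equal_extract_narrative_from_text : Prop := ∀ (lines : List String), Dom_extract_narrative_from_text lines → Spec_extract_narrative_from_text lines (extract_narrative_from_text lines)

-- ===== LEMMAS AND PROOFS =====

-- block decomposition of a pre-stripped line list (forward order)
def pvBlkS : List String → List String → List String
  | [], cur => if cur ≠ [] then [PySem.Str.join " " cur] else []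
  | s :: rest, cur =>
      if s ≠ "" then pvBlkS rest (cur ++ [s])
      else if cur ≠ [] then PySem.Str.join " " cur :: pvBlkS rest []
      else pvBlkS rest cur

theorem pvBlkS_all_ne (zs : List String) (cur : List String) (h : ∀ s ∈ zs, s ≠ "") :
    pvBlkS zs cur = if cur ++ zs = [] then [] else [PySem.Str.join " " (cur ++ zs)] := by
  induction zs generalizing cur with
  | nil => simp [pvBlkS]
  | cons z zs ih =>
      have hz : z ≠ "" := h z (by simp)
      simp only [pvBlkS, if_pos hz]
      rw [ih _ (fun s hs => h s (by simp [hs]))]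
      simp

theorem pvBlkS_split (ys zs : List String) (cur : List String) :
    pvBlkS (ys ++ "" :: zs) cur = pvBlkS ys cur ++ pvBlkS zs [] := by
  induction ys generalizing cur with
  | nil =>
      simp only [List.nil_append, pvBlkS]
      by_cases hc : cur = [] <;> simp [hc]
  | cons y ys ih =>
      simp only [List.cons_append, pvBlkS]
      by_cases hy : y = ""
      · by_cases hc : cur = [] <;> simp [hy, hc, ih]
      · simp [hy, ih]

-- A's foldl builds exactly pvBlkS of the stripped lines
theorem pvFoldA (lines : List String) (tb cur : List String) :
    (let st := lines.foldl
        (fun (st : List String × List String) line =>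
          let stripped := PySem.Str.strip line
          if stripped ≠ "" then (st.1, st.2 ++ [stripped])
          else if st.2 ≠ [] then (st.1 ++ [PySem.Str.join " " st.2], [])
          else st)
        (tb, cur)
      if st.2 ≠ [] then st.1 ++ [PySem.Str.join " " st.2] else st.1)
    = tb ++ pvBlkS (lines.map PySem.Str.strip) cur := by
  induction lines generalizing tb cur with
  | nil =>
      by_cases hc : cur = [] <;> simp [pvBlkS, hc]
  | cons l ls ih =>
      simp only [List.foldl_cons, List.map_cons, pvBlkS]
      by_cases hs : PySem.Str.strip l = ""
      · by_cases hc : cur = []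
        · simpa [hs, hc] using ih tb []
        · simpa [hs, hc] using ih (tb ++ [PySem.Str.join " " cur]) []
      · simpa [hs] using ih tb (cur ++ [PySem.Str.strip l])

-- B's loop returns the first substantial block (scanning the blocks back-to-front)
theorem pvBLoop_eq (l : List String) (buf : List String) (hb : ∀ s ∈ buf, s ≠ "") :
    pvBLoop l buf = pvFindA ((pvBlkS (l.reverse.map PySem.Str.strip ++ buf.reverse) []).reverse) := by
  induction l generalizing buf with
  | nil =>
      rw [List.reverse_nil, List.map_nil, List.nil_append,
        pvBlkS_all_ne _ _ (by simpa using fun s hs => hb s hs)]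
      by_cases hc : buf = [] <;> simp [pvBLoop, pvFindA, hc]
  | cons line rest ih =>
      have hys : ((line :: rest).reverse.map PySem.Str.strip ++ buf.reverse)
          = rest.reverse.map PySem.Str.strip ++ (PySem.Str.strip line :: buf.reverse) := by simp
      rw [hys]
      simp only [pvBLoop]
      by_cases hs : PySem.Str.strip line = ""
      · rw [if_neg (by simp [hs]), hs, pvBlkS_split]
        by_cases hc : buf = []
        · rw [if_neg (by simp [hc]), hc]
          simpa using ih [] (by simp)
        · rw [if_pos hc,
            pvBlkS_all_ne buf.reverse [] (by simpa using fun s hs => hb s hs)]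
          simp only [List.nil_append]
          rw [if_neg (show ¬(buf.reverse = []) by simpa using hc)]
          simp only [List.reverse_append, List.reverse_cons, List.reverse_nil,
            List.nil_append, List.cons_append, pvFindA]
          by_cases hlen : 20 < PySem.Str.len (PySem.Str.join " " buf.reverse)
          · rw [if_pos hlen, if_pos hlen]
          · rw [if_neg hlen, if_neg hlen]
            simpa using ih [] (by simp)
      · rw [if_pos hs]
        have hb' : ∀ s ∈ buf ++ [PySem.Str.strip line], s ≠ "" := by
          intro s h
          rcases List.mem_append.1 h with h | h
          · exact hb s h
          · simp at h; simpa [h] using hs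
        simpa using ih (buf ++ [PySem.Str.strip line]) hb'

-- ===== VERDICT (by name: the statement is the Claim_ definition above) =====
theorem extract_narrative_from_text_spec : Claim_equal_extract_narrative_from_text := by
  intro lines _
  unfold Spec_extract_narrative_from_text extract_narrative_from_text extract_narrative_from_text_alt
  rw [pvBLoop_eq lines.reverse [] (by simp)]
  simp only [List.reverse_reverse, List.reverse_nil, List.append_nil]
  have h := pvFoldA lines [] []
  simp only [List.nil_append] at h
  simp only [h]
  by_cases hb : pvBlkS (lines.map PySem.Str.strip) [] = [] <;> simp [hb, pvFindA]
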